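-- pv_equiv track=rewrite | github.com/clschalkwyk/project-probo | probo/infra_detection.py | _rolling_peak
-- ===== SOURCE A (Python) =====
-- from typing import Dict, List, Optional
--
-- def _rolling_peak(timestamps: List[int], window_seconds: int) -> int:
--     if not timestamps:
--         return 0
--     timestamps = sorted(timestamps)
--     peak = 1
--     left = 0
--     for right in range(len(timestamps)):
--         while timestamps[right] - timestamps[left] > window_seconds:
--             left += 1
--         peak = max(peak, right - left + 1)
--     return peak
-- ===== SOURCE B (Python) =====
-- def _rolling_peak(timestamps, window_seconds):
--     ts = sorted(timestamps)
--     n = len(ts)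
--
--     def below(target):
--         # index of the first element of ts that is >= target (hand-written bisect_left)
--         lo, hi = 0, n
--         while lo < hi:
--             mid = (lo + hi) // 2
--             if ts[mid] < target:
--                 lo = mid + 1
--             else:
--                 hi = mid
--         return lo
--
--     peak = 0
--     for i in range(n):
--         c = i + 1 - below(ts[i] - window_seconds)
--         if c > peak:
--             peak = c
--     return peak
-- ===== Notes on version B (the rewrite author's own statement) =====
-- stated objective: alternative
-- what changed: Replaces the stateful two-pointer sliding window (a left pointer advanced by an inner while across iterations) with an independent per-element binary search for the window's left boundary, folded over the indices with a running maximum starting at 0.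
import Mathlib
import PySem

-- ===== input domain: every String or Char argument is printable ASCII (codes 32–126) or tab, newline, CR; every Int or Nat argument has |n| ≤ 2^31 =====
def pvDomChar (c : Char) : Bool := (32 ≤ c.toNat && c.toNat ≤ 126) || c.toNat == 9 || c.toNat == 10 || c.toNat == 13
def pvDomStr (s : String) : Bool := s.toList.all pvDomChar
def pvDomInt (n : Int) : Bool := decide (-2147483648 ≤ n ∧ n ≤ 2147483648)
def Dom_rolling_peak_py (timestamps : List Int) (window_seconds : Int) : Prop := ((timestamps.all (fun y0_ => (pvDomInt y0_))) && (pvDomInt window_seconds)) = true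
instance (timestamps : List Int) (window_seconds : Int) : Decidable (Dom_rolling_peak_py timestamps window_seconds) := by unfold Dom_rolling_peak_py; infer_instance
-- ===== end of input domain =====

-- B replaces A's stateful two-pointer sliding window by an independent hand-written
-- binary search (bisect_left) per index, folded with a running maximum; same
-- O(n log n) cost, different algorithm.

-- ===== PORT A =====
-- the inner 'while timestamps[right] - timestamps[left] > window_seconds: left += 1';
-- the structural fuel (s.length at every call) bounds the pointer walk, which moves
-- only rightwards; 'none' = Python IndexError (excluded by Pre_)
def pvWhileA (s : List Int) (w t : Int) : Nat → Nat → Nat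
  | left, 0 => left
  | left, f + 1 =>
    match PySem.List.pyGet? s (left : Int) with
    | none => left            -- Python raises IndexError here; outside Pre_
    | some v => if w < t - v then pvWhileA s w t (left + 1) f else left

-- the outer 'for right in range(len(timestamps))' loop carrying (peak, left);
-- fuel = n - r iterations remain
def pvLoopA (s : List Int) (w : Int) (n : Nat) : Nat → Nat → Int → Nat → Int
  | 0, _, peak, _ => peak
  | f + 1, r, peak, left =>
    if r < n then
      match PySem.List.pyGet? s (r : Int) with
      | none => peak          -- unreachable: r < n = s.length
      | some t =>
        let left' := pvWhileA s w t left n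
        pvLoopA s w n f (r + 1) (max peak ((r : Int) - (left' : Int) + 1)) left'
    else peak

def rolling_peak_py (timestamps : List Int) (window_seconds : Int) : Int :=
  if timestamps = [] then 0
  else
    let s := PySem.List.sorted timestamps (fun x => x) false
    pvLoopA s window_seconds s.length s.length 0 1 0

-- ===== PORT B =====
-- Source B's hand-written 'below': while lo < hi: mid = (lo+hi)//2 …; hi - lo shrinks
-- every iteration, so structural fuel s.length covers the whole search; ts[mid] is
-- always in range (mid < hi ≤ n), so the pyGetD default is never taken
def pvBelow (s : List Int) (target : Int) : Nat → Nat → Nat → Nat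
  | 0, lo, _ => lo
  | f + 1, lo, hi =>
    if lo < hi then
      let mid := (lo + hi) / 2
      if PySem.List.pyGetD s (mid : Int) 0 < target then pvBelow s target f (mid + 1) hi
      else pvBelow s target f lo mid
    else lo

-- 'for i in range(n): c = i + 1 - below(ts[i] - window_seconds); if c > peak: peak = c'
def rolling_peak_py_alt (timestamps : List Int) (window_seconds : Int) : Int :=
  let s := PySem.List.sorted timestamps (fun x => x) false
  (PySem.List.pyRange 0 (s.length : Int) 1).foldl
    (fun peak i =>
      let c := i + 1 - ((pvBelow s (PySem.List.pyGetD s i 0 - window_seconds) s.length 0 s.length : Nat) : Int)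
      if peak < c then c else peak) 0

-- ===== PRECONDITION & SPEC =====
-- Pre_ excludes non-empty input with a negative window, on which A raises IndexError
-- (the left pointer is pushed past the end of the list).
def Pre_rolling_peak_py (timestamps : List Int) (window_seconds : Int) : Prop :=
  timestamps = [] ∨ 0 ≤ window_seconds
instance (timestamps : List Int) (window_seconds : Int) : Decidable (Pre_rolling_peak_py timestamps window_seconds) := by unfold Pre_rolling_peak_py; infer_instance
def pvWitness_rolling_peak_py : List Int × Int := ([3, 1, 2, 8], 1)

def Spec_rolling_peak_py (timestamps : List Int) (window_seconds : Int) (out : Int) : Prop := out = rolling_peak_py_alt timestamps window_seconds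
instance (timestamps : List Int) (window_seconds : Int) (out : Int) : Decidable (Spec_rolling_peak_py timestamps window_seconds out) := by unfold Spec_rolling_peak_py; infer_instance

-- ===== CLAIM (what is proved, stated in full; the proofs are below) =====
def Claim_equal_rolling_peak_py : Prop := ∀ (timestamps : List Int) (window_seconds : Int), Dom_rolling_peak_py timestamps window_seconds → Pre_rolling_peak_py timestamps window_seconds → Spec_rolling_peak_py timestamps window_seconds (rolling_peak_py timestamps window_seconds)

-- ===== LEMMAS AND PROOFS =====
-- pvCnt s t = number of elements of s strictly below t; on a sorted s this is both
-- the fixpoint of A's pointer walk and the value of B's binary search.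
def pvCnt (s : List Int) (t : Int) : Nat := s.countP (fun x => decide (x < t))

theorem pvSorted_le (s : List Int) (hs : s.Pairwise (· ≤ ·)) (i j : Nat)
    (hij : i ≤ j) (hj : j < s.length) : s[i]'(by omega) ≤ s[j]'hj := by
  rcases Nat.eq_or_lt_of_le hij with h | h
  · subst h; exact le_rfl
  · exact List.pairwise_iff_getElem.mp hs i j (by omega) hj h

theorem pvCnt_spec_lt (s : List Int) (t : Int) (hs : s.Pairwise (· ≤ ·)) :
    ∀ i (hi : i < s.length), i < pvCnt s t → s[i] < t := by
  induction s with
  | nil => intro i hi; simp at hi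
  | cons x xs ih =>
    rcases List.pairwise_cons.mp hs with ⟨hx, hxs⟩
    have hc : pvCnt (x :: xs) t = pvCnt xs t + (if x < t then 1 else 0) := by
      simp [pvCnt, List.countP_cons]
    intro i hi hcnt
    cases i with
    | zero =>
      simp only [List.getElem_cons_zero]
      by_contra hlt
      push Not at hlt
      have h0 : pvCnt xs t = 0 := by
        simp only [pvCnt, List.countP_eq_zero]
        intro a ha
        simpa using not_lt.2 (hlt.trans (hx a ha))
      rw [hc, if_neg (not_lt.2 hlt)] at hcnt
      omega
    | succ n =>
      simp only [List.getElem_cons_succ]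
      have : n < pvCnt xs t := by
        rw [hc] at hcnt
        split at hcnt <;> omega
      exact ih hxs n (by simpa using hi) this

theorem pvCnt_spec_ge (s : List Int) (t : Int) (hs : s.Pairwise (· ≤ ·)) :
    ∀ i (hi : i < s.length), pvCnt s t ≤ i → t ≤ s[i] := by
  induction s with
  | nil => intro i hi; simp at hi
  | cons x xs ih =>
    rcases List.pairwise_cons.mp hs with ⟨hx, hxs⟩
    have hc : pvCnt (x :: xs) t = pvCnt xs t + (if x < t then 1 else 0) := by
      simp [pvCnt, List.countP_cons]
    intro i hi hcnt
    cases i with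
    | zero =>
      simp only [List.getElem_cons_zero]
      by_contra hlt
      push Not at hlt
      rw [hc, if_pos hlt] at hcnt
      omega
    | succ n =>
      simp only [List.getElem_cons_succ]
      by_cases hxt : x < t
      · refine ih hxs n (by simpa using hi) ?_
        rw [hc, if_pos hxt] at hcnt
        omega
      · exact (not_lt.1 hxt).trans (hx _ (List.getElem_mem _))

theorem pvCnt_le_length (s : List Int) (t : Int) : pvCnt s t ≤ s.length :=
  List.countP_le_length

theorem pvCnt_unique (s : List Int) (t : Int) (hs : s.Pairwise (· ≤ ·)) (k : Nat)
    (hk : k ≤ s.length)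
    (h1 : ∀ i (hi : i < s.length), i < k → s[i] < t)
    (h2 : ∀ i (hi : i < s.length), k ≤ i → t ≤ s[i]) : k = pvCnt s t := by
  rcases Nat.lt_trichotomy k (pvCnt s t) with h | h | h
  · have hk' : k < s.length := lt_of_lt_of_le h (pvCnt_le_length s t)
    have := pvCnt_spec_lt s t hs k hk' h
    have := h2 k hk' le_rfl
    omega
  · exact h
  · have hc' : pvCnt s t < s.length := lt_of_lt_of_le h hk
    have := pvCnt_spec_ge s t hs (pvCnt s t) hc' le_rfl
    have := h1 (pvCnt s t) hc' h
    omega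

theorem pvWhileA_eq (s : List Int) (w t : Int) (hs : s.Pairwise (· ≤ ·))
    (hcnt : pvCnt s (t - w) < s.length) :
    ∀ fuel left, left ≤ pvCnt s (t - w) → pvCnt s (t - w) ≤ left + fuel →
      pvWhileA s w t left fuel = pvCnt s (t - w) := by
  intro fuel
  induction fuel with
  | zero =>
    intro left h1 h2
    have : left = pvCnt s (t - w) := by omega
    simp [pvWhileA, this]
  | succ f ih =>
    intro left h1 h2
    rcases Nat.eq_or_lt_of_le h1 with heq | hlt
    · have hlen : left < s.length := heq ▸ hcnt
      have hge := pvCnt_spec_ge s (t - w) hs left hlen (le_of_eq heq.symm)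
      simp only [pvWhileA, PySem.List.pyGet?_natCast, List.getElem?_eq_getElem hlen]
      rw [if_neg (by omega)]
      exact heq
    · have hlen : left < s.length := lt_trans hlt hcnt
      have hlt' := pvCnt_spec_lt s (t - w) hs left hlen hlt
      simp only [pvWhileA, PySem.List.pyGet?_natCast, List.getElem?_eq_getElem hlen]
      rw [if_pos (by omega)]
      exact ih (left + 1) hlt (by omega)

theorem pvBelow_eq (s : List Int) (t : Int) (hs : s.Pairwise (· ≤ ·)) :
    ∀ fuel lo hi, hi - lo ≤ fuel → hi ≤ s.length → lo ≤ hi →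
      (∀ i (hi' : i < s.length), i < lo → s[i] < t) →
      (∀ i (hi' : i < s.length), hi ≤ i → t ≤ s[i]) →
      pvBelow s t fuel lo hi = pvCnt s t := by
  intro fuel
  induction fuel with
  | zero =>
    intro lo hi hd hhi hlh h1 h2
    have : lo = hi := by omega
    subst this
    simp only [pvBelow]
    exact pvCnt_unique s t hs lo hhi h1 h2
  | succ f ih =>
    intro lo hi hd hhi hlh h1 h2
    simp only [pvBelow]
    by_cases hlt : lo < hi
    · rw [if_pos hlt]
      have hmid1 : lo ≤ (lo + hi) / 2 := by omega
      have hmid2 : (lo + hi) / 2 < hi := by omega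
      have hmlen : (lo + hi) / 2 < s.length := lt_of_lt_of_le hmid2 hhi
      simp only [PySem.List.pyGetD_natCast, List.getD_eq_getElem _ _ hmlen]
      by_cases hv : s[(lo + hi) / 2] < t
      · rw [if_pos hv]
        refine ih ((lo + hi) / 2 + 1) hi (by omega) hhi (by omega) ?_ h2
        intro i hi' hilt
        exact lt_of_le_of_lt (pvSorted_le s hs i ((lo + hi) / 2) (by omega) hmlen) hv
      · rw [if_neg hv]
        refine ih lo ((lo + hi) / 2) (by omega) (le_of_lt hmlen) (by omega) h1 ?_
        intro i hi' hige
        exact le_trans (not_lt.1 hv) (pvSorted_le s hs ((lo + hi) / 2) i hige hi')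
    · rw [if_neg hlt]
      have : lo = hi := by omega
      subst this
      exact pvCnt_unique s t hs lo hhi h1 h2

theorem pvLoops_eq (s : List Int) (w : Int) (hs : s.Pairwise (· ≤ ·)) (hw : 0 ≤ w) :
    ∀ fuel r peak left, s.length - r ≤ fuel →
      (∀ (hr : r < s.length), left ≤ pvCnt s (s[r] - w)) →
      pvLoopA s w s.length fuel r peak left
        = (PySem.List.pyRange (r : Int) (s.length : Int) 1).foldl
            (fun peak i =>
              let c := i + 1 - ((pvBelow s (PySem.List.pyGetD s i 0 - w) s.length 0 s.length : Nat) : Int)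
              if peak < c then c else peak) peak := by
  intro fuel
  induction fuel with
  | zero =>
    intro r peak left hfuel _
    have hnr : ¬ ((r : Int) < (s.length : Int)) := by omega
    rw [PySem.List.pyRange_one_eq_nil (by omega)]
    simp [pvLoopA]
  | succ f ih =>
    intro r peak left hfuel hleft
    by_cases hr : r < s.length
    · rw [PySem.List.pyRange_one_cons (by exact_mod_cast hr)]
      simp only [pvLoopA, if_pos hr, List.foldl_cons]
      simp only [PySem.List.pyGet?_natCast, PySem.List.pyGetD_natCast,
        List.getElem?_eq_getElem hr, List.getD_eq_getElem _ _ hr]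
      have hcr : pvCnt s (s[r] - w) ≤ r := by
        by_contra hc
        have := pvCnt_spec_lt s (s[r] - w) hs r hr (by omega)
        omega
      have hW : pvWhileA s w s[r] left s.length = pvCnt s (s[r] - w) :=
        pvWhileA_eq s w s[r] hs (by omega) s.length left (hleft hr) (by omega)
      have hB : pvBelow s (s[r] - w) s.length 0 s.length = pvCnt s (s[r] - w) :=
        pvBelow_eq s (s[r] - w) hs s.length 0 s.length (by omega) le_rfl (by omega)
          (by intro i _ h; omega) (by intro i hi' h; omega)
      rw [hW, hB]
      have hmax : (if peak < (r : Int) + 1 - (pvCnt s (s[r] - w) : Int)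
            then (r : Int) + 1 - (pvCnt s (s[r] - w) : Int) else peak)
          = max peak ((r : Int) - (pvCnt s (s[r] - w) : Int) + 1) := by
        rcases le_or_gt ((r : Int) + 1 - (pvCnt s (s[r] - w) : Int)) peak with h | h
        · rw [if_neg (by omega)]; omega
        · rw [if_pos h]; omega
      have hstep : ((r : Int) + 1 : Int) = ((r + 1 : Nat) : Int) := by push_cast; ring
      rw [hmax, hstep]
      refine ih (r + 1) _ _ (by omega) ?_
      intro hr'
      have hle : s[r] ≤ s[r + 1] := pvSorted_le s hs r (r + 1) (by omega) hr'
      unfold pvCnt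
      refine List.countP_mono_left ?_
      intro a _ ha
      simp only [decide_eq_true_eq] at ha ⊢
      omega
    · rw [PySem.List.pyRange_one_eq_nil (by omega)]
      simp [pvLoopA, hr]

-- ===== VERDICT (by name: the statement is the Claim_ definition above) =====
theorem rolling_peak_py_spec : Claim_equal_rolling_peak_py := by
  intro ts w _ hpre
  unfold Spec_rolling_peak_py
  by_cases hts : ts = []
  · simp [rolling_peak_py, rolling_peak_py_alt, hts]
  · have hw : 0 ≤ w := hpre.resolve_left hts
    simp only [rolling_peak_py, rolling_peak_py_alt, if_neg hts]
    have hs : (PySem.List.sorted ts (fun x => x) false).Pairwise (· ≤ ·) :=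
      PySem.List.sorted_pairwise ts (fun x => x)
    set s := PySem.List.sorted ts (fun x => x) false with hsdef
    have hlen : 0 < s.length := by
      rw [hsdef, PySem.List.length_sorted]
      exact List.length_pos_iff.mpr hts
    have h00 : ((0 : Nat) : Int) = (0 : Int) := rfl
    rw [← h00]
    rw [pvLoops_eq s w hs hw s.length 0 1 0 (by omega) (fun _ => Nat.zero_le _)]
    -- the two folds differ only in the initial accumulator (1 vs 0); peel one step
    rw [PySem.List.pyRange_one_cons (by exact_mod_cast hlen)]
    simp only [List.foldl_cons]
    simp only [PySem.List.pyGetD_natCast, List.getD_eq_getElem _ _ hlen]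
    have hc0 : pvCnt s (s[0] - w) = 0 := by
      by_contra hc
      have := pvCnt_spec_lt s (s[0] - w) hs 0 hlen (by omega)
      omega
    have hB : pvBelow s (s[0] - w) s.length 0 s.length = 0 := by
      rw [pvBelow_eq s (s[0] - w) hs s.length 0 s.length (by omega) le_rfl (by omega)
        (by intro i _ h; omega) (by intro i hi' h; omega), hc0]
    rw [hB]
    norm_num
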